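-- pv_equiv track=rewrite | github.com/chloesgit/DecisionModelling | main.py | NegativetransitiveCheck
-- ===== SOURCE A (Python) =====
-- def NegativetransitiveCheck(rel):
--     n = len(rel)
--     for i in range(n):
--         for j in range(n):
--             if rel[i][j]==0:
--                 for k in range(n):
--                     if rel[j][k]==0 and rel[i][k]==1:
--                         return False
--     return True
-- ===== SOURCE B (Python) =====
-- def NegativetransitiveCheck(rel):
--     n = len(rel)
--     zero = [sum(1 << k for k in range(n) if row[k] == 0) for row in rel]
--     one = [sum(1 << k for k in range(n) if row[k] == 1) for row in rel]
--     for i in range(n):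
--         for j in range(n):
--             if zero[i] >> j & 1 and zero[j] & one[i]:
--                 return False
--     return True
-- ===== Notes on version B (the rewrite author's own statement) =====
-- stated objective: alternative
-- what changed: Rows are packed once into zero/one bitmasks, so the inner k-scan is replaced by a single bitwise AND per (i,j) pair.
-- outside the precondition, e.g. on NegativetransitiveCheck([[1, 0], [0]]): A returns False, B raises IndexError
import Mathlib
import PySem

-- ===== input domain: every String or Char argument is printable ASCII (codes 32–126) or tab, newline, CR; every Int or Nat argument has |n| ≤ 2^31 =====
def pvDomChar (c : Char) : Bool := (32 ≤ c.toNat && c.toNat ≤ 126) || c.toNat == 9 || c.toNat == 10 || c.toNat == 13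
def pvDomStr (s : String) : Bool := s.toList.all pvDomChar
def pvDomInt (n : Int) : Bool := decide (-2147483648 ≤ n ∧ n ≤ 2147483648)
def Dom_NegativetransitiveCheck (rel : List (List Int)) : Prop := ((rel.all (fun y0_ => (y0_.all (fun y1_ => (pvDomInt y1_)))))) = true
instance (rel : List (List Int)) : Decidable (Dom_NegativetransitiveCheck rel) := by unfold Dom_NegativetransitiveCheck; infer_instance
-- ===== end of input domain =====

-- B packs each row once into zero/one bitmasks so the inner k-scan is replaced by one bitwise AND per (i,j) pair; return values agree on all rows-long-enough inputs.

-- ===== PORT A =====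
-- triple nested loop with early `return False` ⇔ negation of a triple `any`
def NegativetransitiveCheck (rel : List (List Int)) : Bool :=
  let n := rel.length
  !((List.range n).any (fun i =>
    (List.range n).any (fun j =>
      (rel.getD i []).getD j 0 == 0 &&
      (List.range n).any (fun k =>
        (rel.getD j []).getD k 0 == 0 && (rel.getD i []).getD k 0 == 1))))

-- ===== PORT B =====
-- sum(1 << k for k in range(n) if row[k] == v)
def pvMask (row : List Int) (n : Nat) (v : Int) : Nat :=
  (List.range n).foldl (fun acc k => if row.getD k 0 == v then acc + (1 <<< k) else acc) 0

def NegativetransitiveCheck_alt (rel : List (List Int)) : Bool :=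
  let n := rel.length
  let zero := rel.map (fun row => pvMask row n 0)
  let one := rel.map (fun row => pvMask row n 1)
  !((List.range n).any (fun i =>
    (List.range n).any (fun j =>
      ((zero.getD i 0) >>> j) &&& 1 != 0 && (zero.getD j 0) &&& (one.getD i 0) != 0)))

-- ===== PRECONDITION & SPEC =====
-- Pre_ excludes ragged inputs (a row shorter than the number of rows): there both programs
-- normally raise IndexError, except that A can return False first when it finds a violation
-- among the entries it visits before the short access — an accident of A's scan order.
def Pre_NegativetransitiveCheck (rel : List (List Int)) : Prop :=
  ∀ row ∈ rel, rel.length ≤ row.length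
instance (rel : List (List Int)) : Decidable (Pre_NegativetransitiveCheck rel) := by unfold Pre_NegativetransitiveCheck; infer_instance
def pvWitness_NegativetransitiveCheck : List (List Int) := [[1, 1], [0, 1]]

def Spec_NegativetransitiveCheck (rel : List (List Int)) (out : Bool) : Prop := out = NegativetransitiveCheck_alt rel
instance (rel : List (List Int)) (out : Bool) : Decidable (Spec_NegativetransitiveCheck rel out) := by unfold Spec_NegativetransitiveCheck; infer_instance

-- ===== CLAIM (what is proved, stated in full; the proofs are below) =====
def Claim_equal_NegativetransitiveCheck : Prop := ∀ (rel : List (List Int)), Dom_NegativetransitiveCheck rel → Pre_NegativetransitiveCheck rel → Spec_NegativetransitiveCheck rel (NegativetransitiveCheck rel)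

-- ===== LEMMAS AND PROOFS =====

theorem pvMask_succ (row : List Int) (n : Nat) (v : Int) :
    pvMask row (n + 1) v =
      if row.getD n 0 == v then pvMask row n v + (1 <<< n) else pvMask row n v := by
  unfold pvMask
  rw [List.range_succ, List.foldl_append]
  simp

theorem pvMask_lt (row : List Int) (v : Int) : ∀ n, pvMask row n v < 2 ^ n := by
  intro n
  induction n with
  | zero => simp [pvMask]
  | succ n ih =>
    rw [pvMask_succ]
    have h1 : (1 : Nat) <<< n = 2 ^ n := Nat.one_shiftLeft n
    split <;> [skip; skip] <;> (rw [pow_succ]; omega)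

theorem pvMask_testBit (row : List Int) (v : Int) (j : Nat) :
    ∀ n, Nat.testBit (pvMask row n v) j = (decide (j < n) && (row.getD j 0 == v)) := by
  intro n
  induction n with
  | zero => simp [pvMask]
  | succ n ih =>
    rw [pvMask_succ]
    have hlt := pvMask_lt row v n
    have h1 : (1 : Nat) <<< n = 2 ^ n := Nat.one_shiftLeft n
    rcases Nat.lt_trichotomy j n with hjn | rfl | hjn
    · have e1 : decide (j < n) = true := by simp [hjn]
      have e2 : decide (j < n + 1) = true := by simp; omega
      split
      · rw [h1, Nat.add_comm, Nat.testBit_two_pow_add_gt hjn, ih, e1, e2]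
      · rw [ih, e1, e2]
    · split
      · rename_i hv
        rw [h1, Nat.add_comm, Nat.testBit_two_pow_add_eq, Nat.testBit_eq_false_of_lt hlt]
        simp only [Bool.not_false, Nat.lt_succ_self, decide_true, Bool.true_and]
        exact hv.symm
      · rename_i hv
        rw [Nat.testBit_eq_false_of_lt hlt]
        simp only [Nat.lt_succ_self, decide_true, Bool.true_and]
        exact (Bool.eq_false_iff.mpr hv).symm
    · have e2 : decide (j < n + 1) = false := by simp only [decide_eq_false_iff_not]; omega
      have hub : ∀ m : Nat, m < 2 ^ (n + 1) → Nat.testBit m j = false := fun m hm =>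
        Nat.testBit_eq_false_of_lt
          (lt_of_lt_of_le hm (Nat.pow_le_pow_right (by omega) (by omega)))
      rw [e2, Bool.false_and]
      split
      · exact hub _ (by rw [h1, pow_succ]; omega)
      · exact hub _ (by rw [pow_succ]; omega)

theorem getD_map_mask (rel : List (List Int)) (n : Nat) (v : Int) (i : Nat)
    (hi : i < rel.length) :
    (rel.map (fun row => pvMask row n v)).getD i 0 = pvMask (rel.getD i []) n v := by
  rw [List.getD_eq_getElem?_getD, List.getElem?_map,
      List.getElem?_eq_getElem hi, List.getD_eq_getElem?_getD,
      List.getElem?_eq_getElem hi]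
  simp

theorem ne_zero_iff_exists_testBit (x : Nat) : x ≠ 0 ↔ ∃ k, Nat.testBit x k = true := by
  constructor
  · exact Nat.exists_testBit_of_ne_zero
  · rintro ⟨k, hk⟩ h0
    subst h0
    simp [Nat.zero_testBit] at hk

-- ===== VERDICT (by name: the statement is the Claim_ definition above) =====
theorem NegativetransitiveCheck_spec : Claim_equal_NegativetransitiveCheck := by
  intro rel _hdom _hpre
  unfold Spec_NegativetransitiveCheck NegativetransitiveCheck NegativetransitiveCheck_alt
  simp only []
  congr 1
  rw [Bool.eq_iff_iff]
  simp only [List.any_eq_true, List.mem_range]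
  constructor
  · rintro ⟨i, hi, j, hj, hcond⟩
    refine ⟨i, hi, j, hj, ?_⟩
    rw [Bool.and_eq_true] at hcond ⊢
    obtain ⟨h0, hk⟩ := hcond
    constructor
    · rw [getD_map_mask rel rel.length 0 i hi]
      have : Nat.testBit (pvMask (rel.getD i []) rel.length 0) j = true := by
        rw [pvMask_testBit]; simp [hj]; simpa using h0
      unfold Nat.testBit at this
      rw [Nat.and_comm] at this
      exact this
    · rw [getD_map_mask rel rel.length 0 j hj, getD_map_mask rel rel.length 1 i hi]
      simp only [List.any_eq_true, List.mem_range] at hk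
      obtain ⟨k, hkn, hkc⟩ := hk
      rw [Bool.and_eq_true] at hkc
      simp only [ne_eq, bne_iff_ne]
      exact (ne_zero_iff_exists_testBit _).mpr
        ⟨k, by
          rw [Nat.testBit_and, pvMask_testBit, pvMask_testBit]
          simp only [List.getD_eq_getElem?_getD, beq_iff_eq] at hkc
          simp [hkn, hkc.1, hkc.2]⟩
  · rintro ⟨i, hi, j, hj, hcond⟩
    refine ⟨i, hi, j, hj, ?_⟩
    rw [Bool.and_eq_true] at hcond ⊢
    obtain ⟨h0, hk⟩ := hcond
    rw [getD_map_mask rel rel.length 0 i hi] at h0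
    rw [getD_map_mask rel rel.length 0 j hj, getD_map_mask rel rel.length 1 i hi] at hk
    constructor
    · have : Nat.testBit (pvMask (rel.getD i []) rel.length 0) j = true := by
        unfold Nat.testBit
        rw [Nat.and_comm]
        exact h0
      rw [pvMask_testBit] at this
      simp [hj] at this
      simpa using this
    · simp only [ne_eq, bne_iff_ne] at hk
      obtain ⟨k, hkt⟩ := (ne_zero_iff_exists_testBit _).mp hk
      rw [Nat.testBit_and, pvMask_testBit, pvMask_testBit] at hkt
      simp only [Bool.and_eq_true, decide_eq_true_eq, beq_iff_eq,
        List.getD_eq_getElem?_getD] at hkt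
      simp only [List.any_eq_true, List.mem_range]
      exact ⟨k, hkt.1.1, by simp [hkt.1.2, hkt.2.2]⟩
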